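-- pv_equiv track=rewrite | github.com/hellojoju/stock-select | src/stock_select/blindspot_review.py | strongest_blindspot_error
-- ===== SOURCE A (Python) =====
-- from typing import Any
--
-- def strongest_blindspot_error(reasons: list[dict[str, Any]]) -> str | None:
--     priority = [
--         "missed_earnings_surprise",
--         "missed_order_signal",
--         "missed_business_kpi_signal",
--         "missed_risk_event",
--     ]
--     found = {item["error_type"] for item in reasons}
--     for error_type in priority:
--         if error_type in found:
--             return error_type
--     return None
-- ===== SOURCE B (Python) =====
-- def strongest_blindspot_error(reasons):
--     priority = [
--         "missed_earnings_surprise",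
--         "missed_order_signal",
--         "missed_business_kpi_signal",
--         "missed_risk_event",
--     ]
--     pri = {name: i for i, name in enumerate(priority)}
--     idxs = [pri[item["error_type"]] for item in reasons if item["error_type"] in pri]
--     return priority[min(idxs)] if idxs else None
-- ===== Notes on version B (the rewrite author's own statement) =====
-- stated objective: alternative
-- what changed: Instead of building a set of seen error types and scanning the fixed priority list for the first present one, B builds a name-to-rank dict once and makes a single pass over reasons reducing with min over ranks, returning priority[min]. Pre_ excludes inputs where some item lacks the 'error_type' key, on which both A and B raise KeyError.
import Mathlib
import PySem

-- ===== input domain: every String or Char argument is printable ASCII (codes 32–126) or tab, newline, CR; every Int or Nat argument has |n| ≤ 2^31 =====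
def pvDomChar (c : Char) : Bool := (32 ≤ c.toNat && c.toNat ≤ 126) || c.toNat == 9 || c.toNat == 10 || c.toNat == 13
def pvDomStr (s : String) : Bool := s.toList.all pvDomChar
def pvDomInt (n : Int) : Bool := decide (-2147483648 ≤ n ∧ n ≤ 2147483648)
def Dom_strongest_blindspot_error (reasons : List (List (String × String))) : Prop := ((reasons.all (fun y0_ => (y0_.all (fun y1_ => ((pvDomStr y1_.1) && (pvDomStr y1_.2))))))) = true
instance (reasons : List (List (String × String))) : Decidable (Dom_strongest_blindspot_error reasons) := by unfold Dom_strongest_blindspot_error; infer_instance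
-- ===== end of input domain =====

-- B replaces A's seen-set + priority-list scan by a rank dict and a single min-reduction over the reasons; same cost, different traversal.


-- the fixed `priority` list, local to the function in both Pythons
def pvPriority : List String :=
  ["missed_earnings_surprise", "missed_order_signal", "missed_business_kpi_signal", "missed_risk_event"]

-- item["error_type"]: first-match association-list lookup; `.getD ""` is a total stand-in,
-- exact under Pre_ (key present; both Pythons raise KeyError when it is missing)
def pvErrType (item : List (String × String)) : String :=
  (item.lookup "error_type").getD ""

-- ===== PORT A =====
-- the `for error_type in priority: if error_type in found: return` loop
def sbeScan (found : PySem.Set String) : List String → Option String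
  | [] => none
  | p :: ps => if PySem.Set.contains found p then some p else sbeScan found ps

def strongest_blindspot_error (reasons : List (List (String × String))) : Option String :=
  let found : PySem.Set String := PySem.Set.ofList (reasons.map pvErrType)
  sbeScan found pvPriority

-- ===== PORT B =====
def strongest_blindspot_error_alt (reasons : List (List (String × String))) : Option String :=
  let pri : PySem.Dict String Int :=
    (PySem.List.enumerate pvPriority).foldl (fun d p => PySem.Dict.insert d p.2 p.1) PySem.Dict.empty
  let idxs : List Int := reasons.filterMap (fun item => PySem.Dict.get? pri (pvErrType item))
  match PySem.List.min? idxs (fun x => x) with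
  | none => none
  | some i => PySem.List.pyGet? pvPriority i

-- ===== PRECONDITION & SPEC =====
-- Pre_ excludes inputs where some item lacks the "error_type" key: there both Pythons raise KeyError.
def Pre_strongest_blindspot_error (reasons : List (List (String × String))) : Prop :=
  ∀ item ∈ reasons, "error_type" ∈ item.map Prod.fst
instance (reasons : List (List (String × String))) : Decidable (Pre_strongest_blindspot_error reasons) := by unfold Pre_strongest_blindspot_error; infer_instance

def pvWitness_strongest_blindspot_error : (List (List (String × String))) :=
  [[("error_type", "missed_risk_event")], [("error_type", "other")]]

def Spec_strongest_blindspot_error (reasons : List (List (String × String))) (out : Option String) : Prop := out = strongest_blindspot_error_alt reasons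
instance (reasons : List (List (String × String))) (out : Option String) : Decidable (Spec_strongest_blindspot_error reasons out) := by unfold Spec_strongest_blindspot_error; infer_instance

-- ===== CLAIM (what is proved, stated in full; the proofs are below) =====
def Claim_equal_strongest_blindspot_error : Prop := ∀ (reasons : List (List (String × String))), Dom_strongest_blindspot_error reasons → Pre_strongest_blindspot_error reasons → Spec_strongest_blindspot_error reasons (strongest_blindspot_error reasons)


-- ===== LEMMAS AND PROOFS =====

-- B's rank dict, evaluated
def pvPriD : PySem.Dict String Int :=
  (PySem.List.enumerate pvPriority).foldl (fun d p => PySem.Dict.insert d p.2 p.1) PySem.Dict.empty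

theorem pvLook_eq (s : String) :
    PySem.Dict.get? pvPriD s =
      if "missed_earnings_surprise" = s then some 0
      else if "missed_order_signal" = s then some 1
      else if "missed_business_kpi_signal" = s then some 2
      else if "missed_risk_event" = s then some 3
      else none := by
  have h : pvPriD = PySem.Dict.mk
      [("missed_earnings_surprise", 0), ("missed_order_signal", 1),
       ("missed_business_kpi_signal", 2), ("missed_risk_event", 3)] := by decide
  rw [h]
  simp only [PySem.Dict.get?_mk_cons, beq_iff_eq]
  have he : (PySem.Dict.mk ([] : List (String × Int))).get? s = none := rfl
  rw [he]

theorem mem_idxs (ets : List String) (i : Int) :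
    i ∈ ets.filterMap (fun s => PySem.Dict.get? pvPriD s) ↔
      (i = 0 ∧ "missed_earnings_surprise" ∈ ets) ∨ (i = 1 ∧ "missed_order_signal" ∈ ets) ∨
      (i = 2 ∧ "missed_business_kpi_signal" ∈ ets) ∨ (i = 3 ∧ "missed_risk_event" ∈ ets) := by
  simp only [List.mem_filterMap, pvLook_eq]
  constructor
  · rintro ⟨s, hs, he⟩
    split_ifs at he with h0 h1 h2 h3 <;> simp_all
  · rintro (⟨rfl, h⟩ | ⟨rfl, h⟩ | ⟨rfl, h⟩ | ⟨rfl, h⟩)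
    · exact ⟨_, h, by decide⟩
    · exact ⟨_, h, by decide⟩
    · exact ⟨_, h, by decide⟩
    · exact ⟨_, h, by decide⟩

-- min? of the index list is `some k` when rank k is present and no smaller rank is
theorem min_idxs_eq (ets : List String) (k : Int)
    (hk : k ∈ ets.filterMap (fun s => PySem.Dict.get? pvPriD s))
    (hlo : ∀ i ∈ ets.filterMap (fun s => PySem.Dict.get? pvPriD s), k ≤ i) :
    PySem.List.min? (ets.filterMap (fun s => PySem.Dict.get? pvPriD s)) (fun x => x) = some k := by
  cases hmin : PySem.List.min? (ets.filterMap (fun s => PySem.Dict.get? pvPriD s)) (fun x => x) with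
  | none =>
      rw [PySem.List.min?_eq_none_iff] at hmin
      rw [hmin] at hk
      cases hk
  | some m =>
      have hm := PySem.List.min?_mem hmin
      have h1 : m ≤ k := PySem.List.min?_isMin hmin k hk
      have h2 : k ≤ m := hlo m hm
      have : m = k := le_antisymm h1 h2
      rw [this]

theorem key_lemma (ets : List String) :
    sbeScan (PySem.Set.ofList ets) pvPriority =
      (match PySem.List.min?
          (ets.filterMap (fun s => PySem.Dict.get?
            ((PySem.List.enumerate pvPriority).foldl (fun d p => PySem.Dict.insert d p.2 p.1) PySem.Dict.empty) s))
          (fun x => x) with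
        | none => none
        | some i => PySem.List.pyGet? pvPriority i) := by
  show sbeScan (PySem.Set.ofList ets) pvPriority =
      (match PySem.List.min? (ets.filterMap (fun s => PySem.Dict.get? pvPriD s)) (fun x => x) with
        | none => none
        | some i => PySem.List.pyGet? pvPriority i)
  by_cases h0 : "missed_earnings_surprise" ∈ ets
  · rw [min_idxs_eq ets 0 ((mem_idxs ets 0).mpr (by tauto))
      (by intro i hi; rcases (mem_idxs ets i).mp hi with ⟨rfl, _⟩|⟨rfl, _⟩|⟨rfl, _⟩|⟨rfl, _⟩ <;> omega)]
    simp [sbeScan, pvPriority, h0, PySem.List.pyGet?, PySem.List.pyIdx?]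
  by_cases h1 : "missed_order_signal" ∈ ets
  · rw [min_idxs_eq ets 1 ((mem_idxs ets 1).mpr (by tauto))
      (by intro i hi; rcases (mem_idxs ets i).mp hi with ⟨rfl, h⟩|⟨rfl, _⟩|⟨rfl, _⟩|⟨rfl, _⟩ <;> first | omega | exact absurd h h0)]
    simp [sbeScan, pvPriority, h0, h1, PySem.List.pyGet?, PySem.List.pyIdx?]
  by_cases h2 : "missed_business_kpi_signal" ∈ ets
  · rw [min_idxs_eq ets 2 ((mem_idxs ets 2).mpr (by tauto))
      (by intro i hi; rcases (mem_idxs ets i).mp hi with ⟨rfl, h⟩|⟨rfl, h⟩|⟨rfl, _⟩|⟨rfl, _⟩ <;>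
        first | omega | exact absurd h h0 | exact absurd h h1)]
    simp [sbeScan, pvPriority, h0, h1, h2, PySem.List.pyGet?, PySem.List.pyIdx?]
  by_cases h3 : "missed_risk_event" ∈ ets
  · rw [min_idxs_eq ets 3 ((mem_idxs ets 3).mpr (by tauto))
      (by intro i hi; rcases (mem_idxs ets i).mp hi with ⟨rfl, h⟩|⟨rfl, h⟩|⟨rfl, h⟩|⟨rfl, _⟩ <;>
        first | omega | exact absurd h h0 | exact absurd h h1 | exact absurd h h2)]
    simp [sbeScan, pvPriority, h0, h1, h2, h3, PySem.List.pyGet?, PySem.List.pyIdx?]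
  · have hnil : ets.filterMap (fun s => PySem.Dict.get? pvPriD s) = [] := by
      rw [List.eq_nil_iff_forall_not_mem]
      intro i hi
      rcases (mem_idxs ets i).mp hi with ⟨_, h⟩|⟨_, h⟩|⟨_, h⟩|⟨_, h⟩
      · exact h0 h
      · exact h1 h
      · exact h2 h
      · exact h3 h
    rw [hnil]
    simp [sbeScan, pvPriority, h0, h1, h2, h3, PySem.List.min?]

-- ===== VERDICT (by name: the statement is the Claim_ definition above) =====
theorem strongest_blindspot_error_spec : Claim_equal_strongest_blindspot_error := by
  intro reasons _ _
  unfold Spec_strongest_blindspot_error strongest_blindspot_error strongest_blindspot_error_alt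
  have h := key_lemma (reasons.map pvErrType)
  simpa [List.filterMap_map, Function.comp] using h
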